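-- pv_equiv track=rewrite | github.com/SSK29/Smart_learner | app.py | get_ai_resources
-- ===== SOURCE A (Python) =====
-- def get_ai_resources(preference, topics):
--
--     resources = []
--
--     for topic in topics:
--
--         if preference == "Visual":
--
--             yt_query = f"{topic} animation tutorial"
--             google_query = f"{topic} visual explanation diagrams"
--
--             resources.append({
--                 "topic": topic,
--                 "title": f"YouTube Visual: {topic}",
--                 "link": f"https://www.youtube.com/results?search_query={yt_query.replace(' ','+')}"
--             })
--
--             resources.append({
--                 "topic": topic,
--                 "title": f"Google Visual Notes: {topic}",
--                 "link": f"https://www.google.com/search?q={google_query.replace(' ','+')}"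
--             })
--
--
--         elif preference == "Auditory":
--
--             yt_query = f"{topic} lecture explanation"
--
--             resources.append({
--                 "topic": topic,
--                 "title": f"YouTube Lecture: {topic}",
--                 "link": f"https://www.youtube.com/results?search_query={yt_query.replace(' ','+')}"
--             })
--
--
--         elif preference == "Reading":
--
--             google_query = f"{topic} notes pdf tutorial"
--
--             resources.append({
--                 "topic": topic,
--                 "title": f"Google Notes: {topic}",
--                 "link": f"https://www.google.com/search?q={google_query.replace(' ','+')}"
--             })
--
--
--         elif preference == "Kinesthetic":
--
--             practice_query = f"{topic} coding practice problems"
--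
--             resources.append({
--                 "topic": topic,
--                 "title": f"Practice Problems: {topic}",
--                 "link": f"https://www.google.com/search?q={practice_query.replace(' ','+')}"
--             })
--
--     return resources
-- ===== SOURCE B (Python) =====
-- # Columnar (struct-of-arrays) construction: instead of emitting finished dicts one
-- # by one per topic, B first materialises the (topic, spec) product, then builds the
-- # topic/title/link COLUMNS in three separate passes, and finally zips the columns
-- # back into row dicts.
-- _SPECS = {
--     "Visual": [
--         ("YouTube Visual", " animation tutorial", "https://www.youtube.com/results?search_query="),
--         ("Google Visual Notes", " visual explanation diagrams", "https://www.google.com/search?q="),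
--     ],
--     "Auditory": [
--         ("YouTube Lecture", " lecture explanation", "https://www.youtube.com/results?search_query="),
--     ],
--     "Reading": [
--         ("Google Notes", " notes pdf tutorial", "https://www.google.com/search?q="),
--     ],
--     "Kinesthetic": [
--         ("Practice Problems", " coding practice problems", "https://www.google.com/search?q="),
--     ],
-- }
--
-- def get_ai_resources(preference, topics):
--     specs = _SPECS.get(preference, [])
--     pairs = [(t, s) for t in topics for s in specs]
--     topic_col = [t for t, _ in pairs]
--     title_col = [f"{label}: {t}" for t, (label, _, _) in pairs]
--     link_col = [base + (t + suffix).replace(" ", "+") for t, (_, suffix, base) in pairs]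
--     return [
--         {"topic": a, "title": b, "link": c}
--         for a, b, c in zip(topic_col, title_col, link_col)
--     ]
-- ===== Notes on version B (the rewrite author's own statement) =====
-- stated objective: alternative
-- what changed: Replaces A's single pass of per-topic if/elif branches emitting finished dicts with a columnar construction: a spec table looked up once, the (topic, spec) product materialised, the topic/title/link columns each built in its own pass, and the columns zipped back into row dicts at the end.
import Mathlib
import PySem

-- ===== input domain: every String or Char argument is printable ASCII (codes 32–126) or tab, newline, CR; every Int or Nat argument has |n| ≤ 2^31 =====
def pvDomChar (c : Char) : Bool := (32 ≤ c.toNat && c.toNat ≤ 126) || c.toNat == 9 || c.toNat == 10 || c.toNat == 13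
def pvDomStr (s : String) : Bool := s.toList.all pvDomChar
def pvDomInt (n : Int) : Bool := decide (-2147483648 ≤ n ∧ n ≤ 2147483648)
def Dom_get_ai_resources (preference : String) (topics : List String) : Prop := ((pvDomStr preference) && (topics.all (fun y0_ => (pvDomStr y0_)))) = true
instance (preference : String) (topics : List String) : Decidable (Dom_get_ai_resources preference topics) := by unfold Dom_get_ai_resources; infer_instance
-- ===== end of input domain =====

-- B builds the result column-wise (topic/title/link columns in separate passes over
-- the (topic, spec) product, zipped into rows at the end) instead of A's per-topic
-- if/elif chain emitting finished dicts; same cost, alternative decomposition.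

-- ===== PORT A =====
def get_ai_resources (preference : String) (topics : List String) : List (List (String × String)) :=
  topics.foldl (fun resources topic =>
    if preference == "Visual" then
      let yt_query := topic ++ " animation tutorial"
      let google_query := topic ++ " visual explanation diagrams"
      (resources ++ [[("topic", topic), ("title", "YouTube Visual: " ++ topic),
          ("link", "https://www.youtube.com/results?search_query=" ++ PySem.Str.replace yt_query " " "+")]]) ++
        [[("topic", topic), ("title", "Google Visual Notes: " ++ topic),
          ("link", "https://www.google.com/search?q=" ++ PySem.Str.replace google_query " " "+")]]
    else if preference == "Auditory" then
      let yt_query := topic ++ " lecture explanation"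
      resources ++ [[("topic", topic), ("title", "YouTube Lecture: " ++ topic),
        ("link", "https://www.youtube.com/results?search_query=" ++ PySem.Str.replace yt_query " " "+")]]
    else if preference == "Reading" then
      let google_query := topic ++ " notes pdf tutorial"
      resources ++ [[("topic", topic), ("title", "Google Notes: " ++ topic),
        ("link", "https://www.google.com/search?q=" ++ PySem.Str.replace google_query " " "+")]]
    else if preference == "Kinesthetic" then
      let practice_query := topic ++ " coding practice problems"
      resources ++ [[("topic", topic), ("title", "Practice Problems: " ++ topic),
        ("link", "https://www.google.com/search?q=" ++ PySem.Str.replace practice_query " " "+")]]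
    else resources) []

-- ===== PORT B =====
-- the module-level _SPECS dispatch dict of Source B
def pvSpecsTable : PySem.Dict String (List (String × String × String)) :=
  PySem.Dict.ofList
    [("Visual",
      [("YouTube Visual", " animation tutorial", "https://www.youtube.com/results?search_query="),
       ("Google Visual Notes", " visual explanation diagrams", "https://www.google.com/search?q=")]),
     ("Auditory",
      [("YouTube Lecture", " lecture explanation", "https://www.youtube.com/results?search_query=")]),
     ("Reading",
      [("Google Notes", " notes pdf tutorial", "https://www.google.com/search?q=")]),
     ("Kinesthetic",
      [("Practice Problems", " coding practice problems", "https://www.google.com/search?q=")])]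

def get_ai_resources_alt (preference : String) (topics : List String) : List (List (String × String)) :=
  let specs := PySem.Dict.getD pvSpecsTable preference []
  let pairs := topics.flatMap (fun t => specs.map (fun s => (t, s)))
  let topic_col := pairs.map (fun p => p.1)
  let title_col := pairs.map (fun p => p.2.1 ++ ": " ++ p.1)
  let link_col := pairs.map (fun p => p.2.2.2 ++ PySem.Str.replace (p.1 ++ p.2.2.1) " " "+")
  ((topic_col.zip title_col).zip link_col).map (fun q =>
    [("topic", q.1.1), ("title", q.1.2), ("link", q.2)])

-- ===== PRECONDITION & SPEC =====
def Spec_get_ai_resources (preference : String) (topics : List String) (out : List (List (String × String))) : Prop := out = get_ai_resources_alt preference topics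
instance (preference : String) (topics : List String) (out : List (List (String × String))) : Decidable (Spec_get_ai_resources preference topics out) := by unfold Spec_get_ai_resources; infer_instance

-- ===== CLAIM (what is proved, stated in full; the proofs are below) =====
def Claim_equal_get_ai_resources : Prop := ∀ (preference : String) (topics : List String), Dom_get_ai_resources preference topics → Spec_get_ai_resources preference topics (get_ai_resources preference topics)

-- ===== LEMMAS AND PROOFS =====

-- A's loop body rewritten as "append the per-topic block of rows over the specs
-- for this preference" (the if/elif chain matches the table lookup case by case).
theorem get_ai_resources_step (preference : String) (topics : List String) :
    get_ai_resources preference topics =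
      topics.foldl (fun resources topic =>
        resources ++ (PySem.Dict.getD pvSpecsTable preference []).map (fun s =>
          [("topic", topic), ("title", s.1 ++ ": " ++ topic),
           ("link", s.2.2 ++ PySem.Str.replace (topic ++ s.2.1) " " "+")])) [] := by
  unfold get_ai_resources
  congr 1
  funext resources topic
  by_cases h1 : preference = "Visual"
  · subst h1; simp [pvSpecsTable, PySem.Dict.getD, PySem.Dict.get?, PySem.Dict.ofList]
    rfl
  · by_cases h2 : preference = "Auditory"
    · subst h2; simp [pvSpecsTable, PySem.Dict.getD, PySem.Dict.get?, PySem.Dict.ofList]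
      rfl
    · by_cases h3 : preference = "Reading"
      · subst h3; simp [pvSpecsTable, PySem.Dict.getD, PySem.Dict.get?, PySem.Dict.ofList]
        rfl
      · by_cases h4 : preference = "Kinesthetic"
        · subst h4; simp [pvSpecsTable, PySem.Dict.getD, PySem.Dict.get?, PySem.Dict.ofList]
          rfl
        · have e1 : ("Visual" == preference) = false := by simp [Ne.symm h1]
          have e2 : ("Auditory" == preference) = false := by simp [Ne.symm h2]
          have e3 : ("Reading" == preference) = false := by simp [Ne.symm h3]
          have e4 : ("Kinesthetic" == preference) = false := by simp [Ne.symm h4]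
          simp [h1, h2, h3, h4, pvSpecsTable, PySem.Dict.getD, PySem.Dict.get?,
            PySem.Dict.ofList, PySem.Dict.update, PySem.Dict.empty, PySem.Dict.insert,
            List.find?, e1, e2, e3, e4]

-- Zipping three columns that are maps over one list collapses to a single row map.
theorem pv_col_zip {α β γ δ ε : Type} (l : List α) (f : α → β) (g : α → γ) (h : α → δ)
    (row : (β × γ) × δ → ε) :
    ((((l.map f).zip (l.map g)).zip (l.map h)).map row) =
      l.map (fun p => row ((f p, g p), h p)) := by
  simp [List.zip_map', List.map_map]

-- B's columnar construction collapses to one row map over the (topic, spec) product.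
theorem get_ai_resources_alt_rows (preference : String) (topics : List String) :
    get_ai_resources_alt preference topics =
      topics.flatMap (fun topic =>
        (PySem.Dict.getD pvSpecsTable preference []).map (fun s =>
          [("topic", topic), ("title", s.1 ++ ": " ++ topic),
           ("link", s.2.2 ++ PySem.Str.replace (topic ++ s.2.1) " " "+")])) := by
  unfold get_ai_resources_alt
  rw [pv_col_zip]
  simp [List.map_flatMap, List.map_map, Function.comp_def]

-- ===== VERDICT (by name: the statement is the Claim_ definition above) =====
theorem get_ai_resources_spec : Claim_equal_get_ai_resources := by
  intro preference topics _
  unfold Spec_get_ai_resources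
  rw [get_ai_resources_step, PySem.List.foldl_append_eq_flatMap, get_ai_resources_alt_rows]
  simp
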